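-- pv_equiv track=rewrite | github.com/DisyInformationssysteme/git-to-jira-links | correlate_files_per_issue.py | sum_filesizes_per_issue
-- ===== SOURCE A (Python) =====
-- def sum_filesizes_per_issue(changes):
--     """Associate the files with their issues.
--
--     >>> sum_filesizes_per_issue([('FOO-1111', '2018-03-12', ('A', 'B'), (1, 15)), ('FOO-1111', '2018-03-10', ('A', 'C'), (2, 5)), ('FOO-1112', '2018-03-11', ('A', 'D'), (2, 8))])
--     [('2018-03-11:FOO-1112', 10), ('2018-03-12:FOO-1111', 23)]
--     """
--     issuedatelatest = {}
--     mapped = {}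
--     for i in changes:
--         issue = i[0]
--         date = i[1]
--         files = i[2]
--         sizes = i[3]
--         if issue not in issuedatelatest or issuedatelatest[issue] < date:
--             issuedatelatest[issue] = date
--         if issue not in mapped:
--             mapped[issue] = 0
--         for s in sizes:
--             mapped[issue] += s
--     # add the latest known edit date of the issue
--     withdate = {}
--     for key, value in mapped.items():
--         date = issuedatelatest[key]
--         withdate[date + ":" + key] = value
--     return list(sorted(withdate.items()))
-- ===== SOURCE B (Python) =====
-- def sum_filesizes_per_issue(changes):
--     """Group changes per issue, then reduce each group: latest date = max, total = sum."""
--     result = {}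
--     for issue in sorted(set(c[0] for c in changes)):
--         group = [c for c in changes if c[0] == issue]
--         latest = max(c[1] for c in group)
--         total = sum(s for c in group for s in c[3])
--         result[latest + ":" + issue] = total
--     return sorted(result.items())
-- ===== Notes on version B (the rewrite author's own statement) =====
-- stated objective: alternative
-- what changed: B sorts the distinct issue keys first and does one grouped reduction (filter + max over dates + sum over sizes) per issue, instead of A's single streaming pass that maintains two parallel accumulator dicts and re-keys/sorts afterwards.
import Mathlib
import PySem

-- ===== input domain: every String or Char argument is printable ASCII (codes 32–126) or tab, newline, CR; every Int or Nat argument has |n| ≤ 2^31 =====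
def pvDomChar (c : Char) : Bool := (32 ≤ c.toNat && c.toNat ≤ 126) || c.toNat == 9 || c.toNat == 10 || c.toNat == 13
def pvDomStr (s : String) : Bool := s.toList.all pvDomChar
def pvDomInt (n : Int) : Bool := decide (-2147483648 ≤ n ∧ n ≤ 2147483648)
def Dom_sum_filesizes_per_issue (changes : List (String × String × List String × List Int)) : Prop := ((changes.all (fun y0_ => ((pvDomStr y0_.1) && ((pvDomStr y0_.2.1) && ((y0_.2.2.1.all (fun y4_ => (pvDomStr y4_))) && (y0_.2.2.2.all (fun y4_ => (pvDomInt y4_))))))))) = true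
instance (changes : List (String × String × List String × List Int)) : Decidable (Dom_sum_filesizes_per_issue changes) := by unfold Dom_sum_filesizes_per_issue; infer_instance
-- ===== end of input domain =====

-- B groups per issue (sorted distinct keys, one filter + max + sum per group) instead of A's
-- streaming pass over two accumulator dicts; objective: alternative decomposition, not speed.

-- ===== PORT A =====
-- the main loop of A: one pass filling issuedatelatest (st.1) and mapped (st.2)
def sfpiLoop : List (String × String × List String × List Int) →
    PySem.Dict String String → PySem.Dict String Int →
    PySem.Dict String String × PySem.Dict String Int
  | [], d1, d2 => (d1, d2)
  | i :: rest, d1, d2 =>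
    let issue := i.1
    let date := i.2.1
    let sizes := i.2.2.2
    let d1' := if !d1.contains issue || decide (d1.getD issue "" < date) then d1.insert issue date else d1
    let d2' := if d2.contains issue then d2 else d2.insert issue 0
    let d2'' := sizes.foldl (fun m s => m.insert issue (m.getD issue 0 + s)) d2'
    sfpiLoop rest d1' d2''

def sum_filesizes_per_issue (changes : List (String × String × List String × List Int)) : List (String × Int) :=
  let st := sfpiLoop changes PySem.Dict.empty PySem.Dict.empty
  -- issuedatelatest[key] : key is always present, so getD with "" is exact
  let withdate := st.2.items.foldl
    (fun w kv => w.insert (st.1.getD kv.1 "" ++ ":" ++ kv.1) kv.2) PySem.Dict.empty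
  PySem.List.sorted2 withdate.items (fun p => p.1) (fun p => p.2)

-- ===== PORT B =====
def sum_filesizes_per_issue_alt (changes : List (String × String × List String × List Int)) : List (String × Int) :=
  let keysSorted := PySem.List.sorted (PySem.Set.ofList (changes.map (fun c => c.1))) (fun k => k)
  let result := keysSorted.foldl
    (fun r issue =>
      let group := changes.filter (fun c => c.1 == issue)
      let latest := (PySem.List.max? (group.map (fun c => c.2.1)) (fun d => d)).getD ""
      let total := ((group.map (fun c => c.2.2.2)).flatten).sum
      r.insert (latest ++ ":" ++ issue) total) PySem.Dict.empty
  PySem.List.sorted2 result.items (fun p => p.1) (fun p => p.2)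

-- ===== PRECONDITION & SPEC =====
-- Pre_ excludes inputs where the composed "date:issue" keys of two DIFFERENT issues could collide
-- (i.e. ":"+issue1 is a suffix of ":"+issue2); there which total survives the dict overwrite is an
-- accidental artefact of iteration order (A: first-occurrence order, B: sorted order) and both are defensible.
def Pre_sum_filesizes_per_issue (changes : List (String × String × List String × List Int)) : Prop :=
  ∀ c ∈ changes, ∀ c' ∈ changes,
    c.1 = c'.1 ∨ ¬ ((':' :: c.1.toList) <:+ (':' :: c'.1.toList))
instance (changes : List (String × String × List String × List Int)) : Decidable (Pre_sum_filesizes_per_issue changes) := by unfold Pre_sum_filesizes_per_issue; infer_instance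

def pvWitness_sum_filesizes_per_issue : (List (String × String × List String × List Int)) :=
  [("A-1", "2018-03-12", ["f"], [1, 15]), ("A-1", "2018-03-10", ["g"], [2])]

def Spec_sum_filesizes_per_issue (changes : List (String × String × List String × List Int)) (out : List (String × Int)) : Prop := out = sum_filesizes_per_issue_alt changes
instance (changes : List (String × String × List String × List Int)) (out : List (String × Int)) : Decidable (Spec_sum_filesizes_per_issue changes out) := by unfold Spec_sum_filesizes_per_issue; infer_instance

-- ===== CLAIM (what is proved, stated in full; the proofs are below) =====
def Claim_equal_sum_filesizes_per_issue : Prop := ∀ (changes : List (String × String × List String × List Int)), Dom_sum_filesizes_per_issue changes → Pre_sum_filesizes_per_issue changes → Spec_sum_filesizes_per_issue changes (sum_filesizes_per_issue changes)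

-- ===== LEMMAS AND PROOFS =====

-- entries of one issue, and the canonical (key, value) pair both ports produce for it
def sfpiEnts (changes : List (String × String × List String × List Int)) (k : String) :
    List (String × String × List String × List Int) :=
  changes.filter (fun c => c.1 == k)

def sfpiPair (changes : List (String × String × List String × List Int)) (k : String) : String × Int :=
  ((PySem.List.max? ((sfpiEnts changes k).map (fun c => c.2.1)) (fun d => d)).getD "" ++ ":" ++ k,
   (((sfpiEnts changes k).map (fun c => c.2.2.2)).flatten).sum)

-- ---- A-side loop invariants ----
lemma sfpiLoop_cons (i : String × String × List String × List Int)
    (rest : List (String × String × List String × List Int))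
    (d1 : PySem.Dict String String) (d2 : PySem.Dict String Int) :
    sfpiLoop (i :: rest) d1 d2
      = sfpiLoop rest
          (if !d1.contains i.1 || decide (d1.getD i.1 "" < i.2.1) then d1.insert i.1 i.2.1 else d1)
          (i.2.2.2.foldl (fun m s => m.insert i.1 (m.getD i.1 0 + s))
            (if d2.contains i.1 then d2 else d2.insert i.1 0)) := rfl

lemma sfpi_inner_getD (issue : String) (sizes : List Int) (m : PySem.Dict String Int) (k : String) :
    (sizes.foldl (fun m s => m.insert issue (m.getD issue 0 + s)) m).getD k 0
      = m.getD k 0 + (if k = issue then sizes.sum else 0) := by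
  induction sizes generalizing m with
  | nil => simp
  | cons s rest ih =>
    simp only [List.foldl_cons, ih, PySem.Dict.getD_insert, List.sum_cons]
    by_cases hk : k = issue <;> simp [hk] <;> omega

lemma sfpi_inner_keys (issue : String) (sizes : List Int) (m : PySem.Dict String Int)
    (h : m.contains issue = true) :
    (sizes.foldl (fun m s => m.insert issue (m.getD issue 0 + s)) m).keys = m.keys := by
  induction sizes generalizing m with
  | nil => simp
  | cons s rest ih =>
    simp only [List.foldl_cons]
    rw [ih _ (by simp [PySem.Dict.contains_insert_self]),
        PySem.Dict.keys_insert_of_contains _ _ h]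

lemma sfpiLoop_getD (l : List (String × String × List String × List Int))
    (d1 : PySem.Dict String String) (d2 : PySem.Dict String Int) (k : String) :
    (sfpiLoop l d1 d2).2.getD k 0
      = d2.getD k 0 + ((sfpiEnts l k).map (fun c => c.2.2.2.sum)).sum := by
  induction l generalizing d1 d2 with
  | nil => simp [sfpiLoop, sfpiEnts]
  | cons i rest ih =>
    have hents : sfpiEnts (i :: rest) k
        = if i.1 = k then i :: sfpiEnts rest k else sfpiEnts rest k := by
      simp [sfpiEnts, List.filter_cons]
    have hd2' : (if d2.contains i.1 = true then d2 else d2.insert i.1 0).getD k 0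
        = d2.getD k 0 := by
      by_cases hc : d2.contains i.1 = true
      · simp [hc]
      · simp only [hc, if_false, PySem.Dict.getD_insert]
        by_cases hk : k = i.1
        · subst hk; simp [PySem.Dict.getD_of_not_contains _ _ (by simpa using hc)]
        · simp [PySem.Dict.getD_insert, hk]
    rw [sfpiLoop_cons, ih, sfpi_inner_getD, hd2', hents]
    by_cases hk : i.1 = k
    · subst hk; simp; omega
    · have hk' : ¬ k = i.1 := fun h => hk h.symm
      simp [hk, hk']

lemma sfpiLoop_get? (l : List (String × String × List String × List Int))
    (d1 : PySem.Dict String String) (d2 : PySem.Dict String Int) (k : String) :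
    (sfpiLoop l d1 d2).1.get? k
      = ((sfpiEnts l k).map (fun c => c.2.1)).foldl
          (fun acc d => match acc with
            | none => some d
            | some m => if m < d then some d else some m) (d1.get? k) := by
  induction l generalizing d1 d2 with
  | nil => simp [sfpiLoop, sfpiEnts]
  | cons i rest ih =>
    have hents : sfpiEnts (i :: rest) k
        = if i.1 = k then i :: sfpiEnts rest k else sfpiEnts rest k := by
      simp [sfpiEnts, List.filter_cons]
    rw [sfpiLoop_cons, ih, hents]
    by_cases hk : i.1 = k
    · subst hk
      simp only [if_pos rfl, if_true, eq_self_iff_true, List.map_cons, List.foldl_cons]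
      have hinit : ∀ (o : Option String), d1.get? i.1 = o →
          (if !d1.contains i.1 || decide (d1.getD i.1 "" < i.2.1) then d1.insert i.1 i.2.1 else d1).get? i.1
          = (match o with | none => some i.2.1 | some m => if m < i.2.1 then some i.2.1 else some m) := by
        intro o hg
        cases o with
        | none =>
          have hc : d1.contains i.1 = false := (PySem.Dict.get?_eq_none_iff_contains _ _).mp hg
          simp [hc, PySem.Dict.get?_insert]
        | some m =>
          have hc : d1.contains i.1 = true := by
            rw [PySem.Dict.contains_eq_isSome_get?, hg]; rfl
          have hgd : d1.getD i.1 "" = m := PySem.Dict.getD_of_get?_eq_some _ _ hg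
          by_cases hlt : m < i.2.1
          · simp [hc, hgd, hlt, PySem.Dict.get?_insert]
          · simp [hc, hgd, hlt, hg]
      rw [hinit _ rfl]
    · have hne : (if !d1.contains i.1 || decide (d1.getD i.1 "" < i.2.1)
            then d1.insert i.1 i.2.1 else d1).get? k = d1.get? k := by
        split
        · rw [PySem.Dict.get?_insert]
          have hk' : ¬ k = i.1 := fun h => hk h.symm
          simp [hk']
        · rfl
      rw [if_neg hk, hne]

lemma sfpiLoop_keys (l : List (String × String × List String × List Int))
    (d1 : PySem.Dict String String) (d2 : PySem.Dict String Int) :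
    (sfpiLoop l d1 d2).2.keys = PySem.Set.update d2.keys (l.map (fun c => c.1)) := by
  induction l generalizing d1 d2 with
  | nil => simp [sfpiLoop, PySem.Set.update]
  | cons i rest ih =>
    rw [sfpiLoop_cons, ih]
    have hcont : (if d2.contains i.1 then d2 else d2.insert i.1 0).contains i.1 = true := by
      by_cases hc : d2.contains i.1 = true
      · simp [hc]
      · simp only [Bool.not_eq_true] at hc
        simp [hc, PySem.Dict.contains_insert_self]
    rw [sfpi_inner_keys _ _ _ hcont]
    have hkeys : (if d2.contains i.1 then d2 else d2.insert i.1 0).keys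
        = PySem.Set.add d2.keys i.1 := by
      by_cases hc : d2.contains i.1 = true
      · rw [if_pos hc, PySem.Set.add, if_pos]
        rw [PySem.Dict.contains_eq_decide_mem_keys] at hc
        simpa [List.contains_iff_mem] using of_decide_eq_true hc
      · simp only [Bool.not_eq_true] at hc
        rw [if_neg (by simp [hc]), PySem.Dict.keys_insert_of_not_contains _ _ hc,
            PySem.Set.add, if_neg]
        rw [PySem.Dict.contains_eq_decide_mem_keys] at hc
        simpa [List.contains_iff_mem] using hc
    rw [hkeys]
    simp [PySem.Set.update]

-- ---- the composed key "date:issue" is injective for non-suffix-related issues ----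
lemma sfpi_suffix_of_append_eq (a b x y : List Char)
    (h : a ++ ':' :: x = b ++ ':' :: y) :
    (':' :: x) <:+ (':' :: y) ∨ (':' :: y) <:+ (':' :: x) := by
  have h1 : (':' :: x) <:+ (b ++ ':' :: y) := h ▸ ⟨a, rfl⟩
  have h2 : (':' :: y) <:+ (b ++ ':' :: y) := ⟨b, rfl⟩
  exact List.suffix_or_suffix_of_suffix h1 h2

-- ---- sorted2 with distinct first keys is sorted by the first key ----
lemma sfpi_insertBy_congr {α : Type} (f g : α → α → Bool) (x : α) (acc : List α)
    (h : ∀ b ∈ acc, f x b = g x b) :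
    PySem.List.insertBy f x acc = PySem.List.insertBy g x acc := by
  induction acc with
  | nil => rfl
  | cons y ys ih =>
    simp only [PySem.List.insertBy]
    rw [h y (by simp), ih (fun b hb => h b (by simp [hb]))]

lemma sfpi_foldl_insertBy_congr {α : Type} (f g : α → α → Bool) (xs : List α) (S : List α)
    (hsub : ∀ a ∈ xs, a ∈ S) (h : ∀ a ∈ S, ∀ b ∈ S, f a b = g a b) :
    ∀ acc, (∀ a ∈ acc, a ∈ S) →
      xs.foldl (fun acc x => PySem.List.insertBy f x acc) acc
        = xs.foldl (fun acc x => PySem.List.insertBy g x acc) acc := by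
  induction xs with
  | nil => intro acc _; rfl
  | cons x xs ih =>
    intro acc hacc
    have hx : x ∈ S := hsub x (by simp)
    simp only [List.foldl_cons]
    rw [sfpi_insertBy_congr f g x acc (fun b hb => h x hx b (hacc b hb))]
    exact ih (fun a ha => hsub a (by simp [ha])) _
      (fun a ha => ((PySem.List.mem_insertBy g x a acc).mp ha).elim
        (fun he => he ▸ hx) (fun hm => hacc a hm))

lemma sfpi_sorted2_eq_sorted (xs : List (String × Int)) (hnd : (xs.map (fun p => p.1)).Nodup) :
    PySem.List.sorted2 xs (fun p => p.1) (fun p => p.2)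
      = PySem.List.sorted xs (fun p => p.1) := by
  have hinj := List.inj_on_of_nodup_map hnd
  have hcong : ∀ a ∈ xs, ∀ b ∈ xs,
      (decide (a.1 < b.1) || (!decide (b.1 < a.1) && decide (a.2 < b.2)))
        = decide (a.1 < b.1) := by
    intro a ha b hb
    by_cases he : a.1 = b.1
    · have hab : a = b := hinj ha hb he
      subst hab; simp
    · rcases lt_trichotomy a.1 b.1 with hlt | heq | hgt
      · simp [hlt]
      · exact absurd heq he
      · simp [lt_asymm hgt, hgt]
  rw [PySem.List.sorted_eq_foldl_insertBy]
  show xs.foldl (fun acc x => PySem.List.insertBy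
      (fun a b => decide (a.1 < b.1) || (!decide (b.1 < a.1) && decide (a.2 < b.2))) x acc) []
    = xs.foldl (fun acc x => PySem.List.insertBy (fun a b => decide (a.1 < b.1)) x acc) []
  exact sfpi_foldl_insertBy_congr _ _ xs xs (fun a ha => ha) hcong [] (by simp)

-- ---- items of the two result dicts ----
lemma sfpi_maxFold (ds : List String) :
    ds.foldl (fun acc d => match acc with
      | none => some d
      | some m => if m < d then some d else some m) none
      = PySem.List.max? ds (fun d => d) := by
  unfold PySem.List.max?
  congr 1
  funext acc d
  cases acc <;> rfl

lemma sfpi_nodup_keys (changes : List (String × String × List String × List Int))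
    (hpre : Pre_sum_filesizes_per_issue changes) :
    ((PySem.Set.ofList (changes.map (fun c => c.1))).map
      (fun k => (sfpiPair changes k).1)).Nodup := by
  apply List.Nodup.map_on _ (PySem.Set.nodup_ofList _)
  intro x hx y hy h
  obtain ⟨c, hc, rfl⟩ := List.mem_map.mp ((PySem.Set.mem_ofList _ _).mp hx)
  obtain ⟨c', hc', rfl⟩ := List.mem_map.mp ((PySem.Set.mem_ofList _ _).mp hy)
  have h' : ((PySem.List.max? ((sfpiEnts changes c.1).map (fun e => e.2.1)) (fun d => d)).getD "").toList
        ++ ':' :: c.1.toList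
      = ((PySem.List.max? ((sfpiEnts changes c'.1).map (fun e => e.2.1)) (fun d => d)).getD "").toList
        ++ ':' :: c'.1.toList := by
    have := congrArg String.toList h
    simpa [sfpiPair, String.toList_append] using this
  rcases hpre c hc c' hc' with heq | hns
  · exact heq
  rcases hpre c' hc' c hc with heq | hns'
  · exact heq.symm
  rcases sfpi_suffix_of_append_eq _ _ _ _ h' with hs | hs
  · exact absurd hs hns
  · exact absurd hs hns'

lemma sfpi_itemsA (changes : List (String × String × List String × List Int))
    (hpre : Pre_sum_filesizes_per_issue changes) :
    (((sfpiLoop changes PySem.Dict.empty PySem.Dict.empty).2.items.foldl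
        (fun w kv => w.insert ((sfpiLoop changes PySem.Dict.empty PySem.Dict.empty).1.getD kv.1 "" ++ ":" ++ kv.1) kv.2)
        PySem.Dict.empty).items)
      = (PySem.Set.ofList (changes.map (fun c => c.1))).map (sfpiPair changes) := by
  have hkeys : (sfpiLoop changes PySem.Dict.empty PySem.Dict.empty).2.keys
      = PySem.Set.ofList (changes.map (fun c => c.1)) := by
    rw [sfpiLoop_keys, PySem.Dict.keys_empty]; rfl
  have hnodupK : (PySem.Set.ofList (changes.map (fun c => c.1))).Nodup :=
    PySem.Set.nodup_ofList _
  have hitems : (sfpiLoop changes PySem.Dict.empty PySem.Dict.empty).2.items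
      = (PySem.Set.ofList (changes.map (fun c => c.1))).map
          (fun k => (k, (sfpiLoop changes PySem.Dict.empty PySem.Dict.empty).2.getD k 0)) := by
    rw [PySem.Dict.items_eq_map_keys _ (by rw [hkeys]; exact hnodupK) 0, hkeys]
  have hgetD : ∀ k, (sfpiLoop changes PySem.Dict.empty PySem.Dict.empty).2.getD k 0
      = (sfpiPair changes k).2 := by
    intro k
    rw [sfpiLoop_getD]
    simp only [sfpiPair, List.sum_flatten, List.map_map]
    simp [PySem.Dict.getD_empty]
    rfl
  have hdate : ∀ k, (sfpiLoop changes PySem.Dict.empty PySem.Dict.empty).1.getD k ""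
      = (PySem.List.max? ((sfpiEnts changes k).map (fun c => c.2.1)) (fun d => d)).getD "" := by
    intro k
    rw [PySem.Dict.getD_eq_get?_getD, sfpiLoop_get?, PySem.Dict.get?_empty, sfpi_maxFold]
  have hfun : ∀ kv : String × Int,
      (sfpiLoop changes PySem.Dict.empty PySem.Dict.empty).1.getD kv.1 "" ++ ":" ++ kv.1
        = (sfpiPair changes kv.1).1 := by
    intro kv; rw [hdate]; rfl
  have hmapk : (sfpiLoop changes PySem.Dict.empty PySem.Dict.empty).2.items.map
      (fun kv => (sfpiLoop changes PySem.Dict.empty PySem.Dict.empty).1.getD kv.1 "" ++ ":" ++ kv.1)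
      = (PySem.Set.ofList (changes.map (fun c => c.1))).map (fun k => (sfpiPair changes k).1) := by
    rw [hitems, List.map_map]
    exact List.map_congr_left (fun k _ => hfun _)
  rw [PySem.Dict.items_foldl_insert_fresh _ _ _ _
      (fun a _ => PySem.Dict.contains_empty _) (by rw [hmapk]; exact sfpi_nodup_keys changes hpre)]
  rw [hitems, List.map_map]
  have : (PySem.Dict.empty : PySem.Dict String Int).items = [] := rfl
  rw [this, List.nil_append]
  refine List.map_congr_left (fun k _ => ?_)
  show ((sfpiLoop changes PySem.Dict.empty PySem.Dict.empty).1.getD k "" ++ ":" ++ k,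
      (sfpiLoop changes PySem.Dict.empty PySem.Dict.empty).2.getD k 0) = sfpiPair changes k
  rw [hgetD]
  exact Prod.ext (hfun (k, 0)) rfl

lemma sfpi_itemsB (changes : List (String × String × List String × List Int))
    (hpre : Pre_sum_filesizes_per_issue changes) :
    ((PySem.List.sorted (PySem.Set.ofList (changes.map (fun c => c.1))) (fun k => k)).foldl
        (fun r issue =>
          r.insert ((PySem.List.max? ((changes.filter (fun c => c.1 == issue)).map (fun c => c.2.1)) (fun d => d)).getD "" ++ ":" ++ issue)
            (((changes.filter (fun c => c.1 == issue)).map (fun c => c.2.2.2)).flatten).sum)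
        PySem.Dict.empty).items
      = (PySem.List.sorted (PySem.Set.ofList (changes.map (fun c => c.1))) (fun k => k)).map (sfpiPair changes) := by
  have hperm : (PySem.List.sorted (PySem.Set.ofList (changes.map (fun c => c.1))) (fun k => k)).Perm
      (PySem.Set.ofList (changes.map (fun c => c.1))) := PySem.List.sorted_perm _ _ _
  have hnodup : ((PySem.List.sorted (PySem.Set.ofList (changes.map (fun c => c.1))) (fun k => k)).map
      (fun k => (sfpiPair changes k).1)).Nodup := by
    exact ((hperm.map _).nodup_iff).mpr (sfpi_nodup_keys changes hpre)
  rw [PySem.Dict.items_foldl_insert_fresh _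
      (fun issue => (PySem.List.max? ((changes.filter (fun c => c.1 == issue)).map (fun c => c.2.1)) (fun d => d)).getD "" ++ ":" ++ issue)
      (fun issue => (((changes.filter (fun c => c.1 == issue)).map (fun c => c.2.2.2)).flatten).sum) _
      (fun a _ => PySem.Dict.contains_empty _) hnodup]
  have : (PySem.Dict.empty : PySem.Dict String Int).items = [] := rfl
  rw [this, List.nil_append]
  rfl

-- ===== VERDICT (by name: the statement is the Claim_ definition above) =====
theorem sum_filesizes_per_issue_spec : Claim_equal_sum_filesizes_per_issue := by
  intro changes hdom hpre
  show sum_filesizes_per_issue changes = sum_filesizes_per_issue_alt changes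
  have hA : sum_filesizes_per_issue changes
      = PySem.List.sorted2
          (((sfpiLoop changes PySem.Dict.empty PySem.Dict.empty).2.items.foldl
            (fun w kv => w.insert ((sfpiLoop changes PySem.Dict.empty PySem.Dict.empty).1.getD kv.1 "" ++ ":" ++ kv.1) kv.2)
            PySem.Dict.empty).items) (fun p => p.1) (fun p => p.2) := rfl
  have hB : sum_filesizes_per_issue_alt changes
      = PySem.List.sorted2
          (((PySem.List.sorted (PySem.Set.ofList (changes.map (fun c => c.1))) (fun k => k)).foldl
            (fun r issue =>
              r.insert ((PySem.List.max? ((changes.filter (fun c => c.1 == issue)).map (fun c => c.2.1)) (fun d => d)).getD "" ++ ":" ++ issue)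
                (((changes.filter (fun c => c.1 == issue)).map (fun c => c.2.2.2)).flatten).sum)
            PySem.Dict.empty).items) (fun p => p.1) (fun p => p.2) := rfl
  rw [hA, hB, sfpi_itemsA changes hpre, sfpi_itemsB changes hpre]
  have hnodA : (((PySem.Set.ofList (changes.map (fun c => c.1))).map (sfpiPair changes)).map
      (fun p => p.1)).Nodup := by
    rw [List.map_map]; exact sfpi_nodup_keys changes hpre
  have hpermK : (PySem.List.sorted (PySem.Set.ofList (changes.map (fun c => c.1))) (fun k => k)).Perm
      (PySem.Set.ofList (changes.map (fun c => c.1))) := PySem.List.sorted_perm _ _ _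
  have hnodB : (((PySem.List.sorted (PySem.Set.ofList (changes.map (fun c => c.1))) (fun k => k)).map
      (sfpiPair changes)).map (fun p => p.1)).Nodup := by
    rw [List.map_map]
    exact ((hpermK.map _).nodup_iff).mpr (sfpi_nodup_keys changes hpre)
  rw [sfpi_sorted2_eq_sorted _ hnodA, sfpi_sorted2_eq_sorted _ hnodB]
  have hperm1 : (PySem.List.sorted ((PySem.Set.ofList (changes.map (fun c => c.1))).map (sfpiPair changes))
      (fun p => p.1)).Perm ((PySem.Set.ofList (changes.map (fun c => c.1))).map (sfpiPair changes)) :=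
    PySem.List.sorted_perm _ _ _
  have hple := PySem.List.sorted_pairwise ((PySem.Set.ofList (changes.map (fun c => c.1))).map (sfpiPair changes)) (fun p => p.1)
  have hnody : ((PySem.List.sorted ((PySem.Set.ofList (changes.map (fun c => c.1))).map (sfpiPair changes))
      (fun p => p.1)).map (fun p => p.1)).Nodup := ((hperm1.map _).nodup_iff).mpr hnodA
  have hpne := List.pairwise_map.mp hnody
  have hplt := (hple.and hpne).imp (fun h => lt_of_le_of_ne h.1 h.2)
  have h2 : (PySem.List.sorted ((PySem.Set.ofList (changes.map (fun c => c.1))).map (sfpiPair changes))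
      (fun p => p.1)).Perm
      ((PySem.List.sorted (PySem.Set.ofList (changes.map (fun c => c.1))) (fun k => k)).map (sfpiPair changes)) :=
    hperm1.trans ((hpermK.map (sfpiPair changes)).symm)
  rw [PySem.List.sorted_eq_of_perm_of_pairwise_lt _ _ (fun p => p.1) h2 hplt]
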